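-- pv_equiv track=rewrite | github.com/prasetiaari/ReconLens | core/fingerprint.py | _stable_params_string
-- ===== SOURCE A (Python) =====
-- from typing import Dict, Iterable, List, Tuple
--
-- def _stable_params_string(params: Dict[str, List[str]]) -> str:
--     """
--     Bentuk string stabil dari params:
--     - kunci diurutkan alfabet
--     - nilai per kunci juga diurutkan (untuk dedup yang agresif)
--       (catatan: kalau ingin mempertahankan order asli, ganti strategi ini)
--     - format: key=val1&key=val2&b=1
--     """
--     if not params:
--         return ""
--     parts: List[str] = []
--     for k in sorted(params.keys()):
--         vals = params[k]
--         # urutkan nilai agar 'a=1& a=2' == 'a=2& a=1'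
--         for v in sorted(vals):
--             parts.append(f"{k}={v}")
--     return "&".join(parts)
-- ===== SOURCE B (Python) =====
-- def _stable_params_string(params):
--     # Alternative decomposition: one combined lexicographic sort over all (key, value)
--     # pairs replaces A's key-sort with a per-key value-sort.
--     pairs = sorted((k, v) for k, vals in params.items() for v in vals)
--     return "&".join(f"{k}={v}" for k, v in pairs)
-- ===== Notes on version B (the rewrite author's own statement) =====
-- stated objective: alternative
-- what changed: Instead of sorting the keys and then sorting each key's value list inside a nested loop, B flattens the dict into one list of (key, value) pairs, performs a single lexicographic sort of that list, and joins; equivalence rests on the proved fact that one combined pair sort equals the grouped two-level sort.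
import Mathlib
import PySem

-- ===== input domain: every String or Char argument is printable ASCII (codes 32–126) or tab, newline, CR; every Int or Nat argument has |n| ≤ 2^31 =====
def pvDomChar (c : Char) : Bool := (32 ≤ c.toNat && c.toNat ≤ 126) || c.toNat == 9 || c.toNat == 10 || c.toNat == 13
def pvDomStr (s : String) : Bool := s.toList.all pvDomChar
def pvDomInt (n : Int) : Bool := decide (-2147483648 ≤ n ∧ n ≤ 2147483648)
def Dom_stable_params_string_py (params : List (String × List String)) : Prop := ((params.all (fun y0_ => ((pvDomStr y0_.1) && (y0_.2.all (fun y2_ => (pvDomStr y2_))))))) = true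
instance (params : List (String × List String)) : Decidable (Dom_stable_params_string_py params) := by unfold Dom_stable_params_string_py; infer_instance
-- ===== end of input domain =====

-- B replaces A's nested key-sort/value-sort loop by one combined lexicographic sort of all
-- (key, value) pairs followed by a single join (objective: alternative decomposition, same cost).

-- ===== PORT A =====
-- literal port of A: sorted keys, per-key sorted values, "k=v" parts, "&".join.
-- (the dict argument is received as an association list; PySem.Dict.ofList builds the dict)
def stable_params_string_py (params : List (String × List String)) : String :=
  let d := PySem.Dict.ofList params
  if d.items.isEmpty then "" else
    let parts : List String :=
      (PySem.List.sorted d.keys (fun k => k)).foldl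
        (fun parts k =>
          -- vals = params[k]: k is drawn from d.keys, so the lookup always succeeds
          (PySem.List.sorted (d.getD k []) (fun v => v)).foldl
            (fun parts v => parts ++ [k ++ "=" ++ v]) parts)
        []
    PySem.Str.join "&" parts

-- ===== PORT B =====
-- literal port of B: flatten to (k, v) pairs, one tuple sort, join.
def stable_params_string_py_alt (params : List (String × List String)) : String :=
  let pairs := (PySem.Dict.ofList params).items.flatMap (fun kv => kv.2.map (fun v => (kv.1, v)))
  PySem.Str.join "&" ((PySem.List.sorted2 pairs Prod.fst Prod.snd).map (fun kv => kv.1 ++ "=" ++ kv.2))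

-- ===== PRECONDITION & SPEC =====
def Spec_stable_params_string_py (params : List (String × List String)) (out : String) : Prop := out = stable_params_string_py_alt params
instance (params : List (String × List String)) (out : String) : Decidable (Spec_stable_params_string_py params out) := by unfold Spec_stable_params_string_py; infer_instance

-- ===== CLAIM (what is proved, stated in full; the proofs are below) =====
def Claim_equal_stable_params_string_py : Prop := ∀ (params : List (String × List String)), Dom_stable_params_string_py params → Spec_stable_params_string_py params (stable_params_string_py params)

-- ===== LEMMAS AND PROOFS =====

-- lexicographic ≤ on (key, value) pairs: the order B's combined sort realises
def pvLexLe (a b : String × String) : Prop := a.1 < b.1 ∨ (a.1 = b.1 ∧ a.2 ≤ b.2)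

-- the Boolean comparator sorted2 uses with keys Prod.fst, Prod.snd
def pvBefore (a b : String × String) : Bool :=
  decide (a.1 < b.1) || (!decide (b.1 < a.1) && decide (a.2 < b.2))

lemma pvLexLe_of_before_true {a b : String × String} (h : pvBefore a b = true) : pvLexLe a b := by
  unfold pvBefore at h; unfold pvLexLe
  rcases lt_trichotomy a.1 b.1 with h1 | h1 | h1
  · exact Or.inl h1
  · simp [h1] at h ⊢; exact le_of_lt h
  · simp [h1, not_lt.mpr (le_of_lt h1)] at h

lemma pvLexLe_of_before_false {a b : String × String} (h : pvBefore a b = false) : pvLexLe b a := by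
  unfold pvBefore at h; unfold pvLexLe
  rcases lt_trichotomy a.1 b.1 with h1 | h1 | h1
  · simp [h1] at h
  · simp [h1] at h ⊢; exact h
  · exact Or.inl h1

lemma pvLexLe_trans {a b c : String × String} (h1 : pvLexLe a b) (h2 : pvLexLe b c) : pvLexLe a c := by
  unfold pvLexLe at *
  rcases h1 with h1 | ⟨h1, h1'⟩ <;> rcases h2 with h2 | ⟨h2, h2'⟩
  · exact Or.inl (lt_trans h1 h2)
  · exact Or.inl (h2 ▸ h1)
  · exact Or.inl (h1 ▸ h2)
  · exact Or.inr ⟨h1.trans h2, le_trans h1' h2'⟩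

lemma pvLexLe_antisymm {a b : String × String} (h1 : pvLexLe a b) (h2 : pvLexLe b a) : a = b := by
  unfold pvLexLe at *
  rcases h1 with h1 | ⟨h1, h1'⟩ <;> rcases h2 with h2 | ⟨h2, h2'⟩
  · exact absurd h2 (asymm h1)
  · exact absurd h1 (h2 ▸ lt_irrefl _)
  · exact absurd h2 (h1 ▸ lt_irrefl _)
  · exact Prod.ext h1 (le_antisymm h1' h2')

lemma pv_insertBy_pairwise {x : String × String} {ys : List (String × String)}
    (h : ys.Pairwise pvLexLe) :
    (PySem.List.insertBy pvBefore x ys).Pairwise pvLexLe := by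
  induction ys with
  | nil => simp [PySem.List.insertBy]
  | cons y t ih =>
    rw [PySem.List.insertBy.eq_2]
    rw [List.pairwise_cons] at h
    obtain ⟨hy, ht⟩ := h
    by_cases hb : pvBefore x y = true
    · simp only [hb, if_true]
      refine List.Pairwise.cons ?_ (List.Pairwise.cons hy ht)
      intro z hz
      rcases List.mem_cons.mp hz with rfl | hz
      · exact pvLexLe_of_before_true hb
      · exact pvLexLe_trans (pvLexLe_of_before_true hb) (hy z hz)
    · simp only [hb]
      refine List.Pairwise.cons ?_ (ih ht)
      intro z hz
      rcases (PySem.List.mem_insertBy _ _ _ _).mp hz with rfl | hz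
      · exact pvLexLe_of_before_false (Bool.eq_false_iff.mpr hb)
      · exact hy z hz

lemma pv_foldl_insertBy_pairwise (xs : List (String × String)) :
    ∀ acc : List (String × String), acc.Pairwise pvLexLe →
      (xs.foldl (fun acc x => PySem.List.insertBy pvBefore x acc) acc).Pairwise pvLexLe := by
  induction xs with
  | nil => intro acc h; exact h
  | cons x t ih => intro acc h; exact ih _ (pv_insertBy_pairwise h)

lemma pv_sorted2_eq_foldl (xs : List (String × String)) :
    PySem.List.sorted2 xs Prod.fst Prod.snd =
      xs.foldl (fun acc x => PySem.List.insertBy pvBefore x acc) [] := rfl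

lemma pv_sorted2_pairwise (xs : List (String × String)) :
    (PySem.List.sorted2 xs Prod.fst Prod.snd).Pairwise pvLexLe := by
  rw [pv_sorted2_eq_foldl]
  exact pv_foldl_insertBy_pairwise xs [] List.Pairwise.nil

-- the combined pair sort is the unique pvLexLe-nondecreasing arrangement
lemma pv_sorted2_eq_of_perm_of_pairwise {xs ys : List (String × String)}
    (hp : ys.Perm xs) (hs : ys.Pairwise pvLexLe) :
    PySem.List.sorted2 xs Prod.fst Prod.snd = ys :=
  List.Perm.eq_of_pairwise (fun _ _ _ _ h1 h2 => pvLexLe_antisymm h1 h2)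
    (pv_sorted2_pairwise xs) hs ((PySem.List.sorted2_perm xs _ _ false).trans hp.symm)

-- first-match lookup in a duplicate-free association list finds the element itself
lemma pv_find?_eq_of_mem_nodup {l : List (String × List String)} {kv : String × List String}
    (hn : (l.map Prod.fst).Nodup) (hm : kv ∈ l) :
    l.find? (fun p => p.1 == kv.1) = some kv := by
  induction l with
  | nil => cases hm
  | cons p t ih =>
    rcases List.mem_cons.mp hm with rfl | hm
    · simp [List.find?]
    · rw [List.map_cons, List.nodup_cons] at hn
      have hne : (p.1 == kv.1) = false := by
        apply beq_eq_false_iff_ne.mpr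
        intro he
        exact hn.1 (he ▸ List.mem_map.mpr ⟨kv, hm, rfl⟩)
      simp [List.find?, hne, ih hn.2 hm]

lemma pv_getD_of_mem {d : PySem.Dict String (List String)} {kv : String × List String}
    (hn : d.keys.Nodup) (hm : kv ∈ d.items) :
    d.getD kv.1 [] = kv.2 := by
  have : d.items.find? (fun p => p.1 == kv.1) = some kv := pv_find?_eq_of_mem_nodup hn hm
  simp [PySem.Dict.getD, PySem.Dict.get?, this]

-- the grouped two-level arrangement A produces (sorted keys, values sorted within each key)
def pvTarget (d : PySem.Dict String (List String)) : List (String × String) :=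
  (PySem.List.sorted d.keys (fun k => k)).flatMap
    (fun k => (PySem.List.sorted (d.getD k []) (fun v => v)).map (fun v => (k, v)))

lemma pv_target_perm (d : PySem.Dict String (List String)) (hn : d.keys.Nodup) :
    (pvTarget d).Perm (d.items.flatMap (fun kv => kv.2.map (fun v => (kv.1, v)))) := by
  unfold pvTarget
  have h1 : (pvTarget d).Perm
      ((d.items.map Prod.fst).flatMap
        (fun k => (PySem.List.sorted (d.getD k []) (fun v => v)).map (fun v => (k, v)))) := by
    exact List.Perm.flatMap (PySem.List.sorted_perm d.keys (fun k => k) false)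
      (fun a _ => List.Perm.refl _)
  rw [List.flatMap_map] at h1
  refine h1.trans (List.Perm.flatMap (List.Perm.refl d.items) ?_)
  intro kv hkv
  rw [pv_getD_of_mem hn hkv]
  exact (PySem.List.sorted_perm kv.2 (fun v => v) false).map _

lemma pv_target_pairwise (d : PySem.Dict String (List String)) (hn : d.keys.Nodup) :
    (pvTarget d).Pairwise pvLexLe := by
  unfold pvTarget
  rw [List.flatMap, List.pairwise_flatten]
  constructor
  · intro l' hl'
    rcases List.mem_map.mp hl' with ⟨k, _, rfl⟩
    rw [List.pairwise_map]
    refine (PySem.List.sorted_pairwise (d.getD k []) (fun v => v)).imp ?_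
    intro a b hab
    exact Or.inr ⟨rfl, hab⟩
  · rw [List.pairwise_map]
    have hlt : (PySem.List.sorted d.keys (fun k => k)).Pairwise (· < ·) := by
      have hle := PySem.List.sorted_pairwise d.keys (fun k => k)
      have hnd : (PySem.List.sorted d.keys (fun k => k)).Nodup :=
        (PySem.List.sorted_perm d.keys (fun k => k) false).nodup_iff.mpr hn
      refine (hle.and hnd).imp ?_
      intro a b ⟨h1, h2⟩
      exact lt_of_le_of_ne h1 h2
    refine hlt.imp ?_
    intro a b hab x hx y hy
    rcases List.mem_map.mp hx with ⟨_, _, rfl⟩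
    rcases List.mem_map.mp hy with ⟨_, _, rfl⟩
    exact Or.inl hab

lemma pv_sorted2_pairs_eq (d : PySem.Dict String (List String)) (hn : d.keys.Nodup) :
    PySem.List.sorted2 (d.items.flatMap (fun kv => kv.2.map (fun v => (kv.1, v)))) Prod.fst Prod.snd
      = pvTarget d :=
  pv_sorted2_eq_of_perm_of_pairwise (pv_target_perm d hn) (pv_target_pairwise d hn)

-- ===== VERDICT (by name: the statement is the Claim_ definition above) =====
theorem stable_params_string_py_spec : Claim_equal_stable_params_string_py := by
  intro params _
  unfold Spec_stable_params_string_py stable_params_string_py stable_params_string_py_alt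
  dsimp only
  set d := PySem.Dict.ofList params with hd
  have hn : d.keys.Nodup := PySem.Dict.nodup_keys_ofList params
  rw [pv_sorted2_pairs_eq d hn]
  by_cases he : d.items.isEmpty
  · have : d.items = [] := List.isEmpty_iff.mp he
    simp only [he, if_true]
    have hk : d.keys = [] := by simp [PySem.Dict.keys, this]
    unfold pvTarget
    rw [hk]
    rfl
  · rw [if_neg he]
    congr 1
    have hinner : ∀ (k : String) (acc : List String),
        (PySem.List.sorted (d.getD k []) (fun v => v)).foldl
          (fun parts v => parts ++ [k ++ "=" ++ v]) acc
        = acc ++ (PySem.List.sorted (d.getD k []) (fun v => v)).map (fun v => k ++ "=" ++ v) :=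
      fun k acc => PySem.List.foldl_append_singleton_eq_map _ _ acc
    calc (PySem.List.sorted d.keys (fun k => k)).foldl
          (fun parts k => (PySem.List.sorted (d.getD k []) (fun v => v)).foldl
            (fun parts v => parts ++ [k ++ "=" ++ v]) parts) []
        = (PySem.List.sorted d.keys (fun k => k)).foldl
            (fun parts k => parts ++ (PySem.List.sorted (d.getD k []) (fun v => v)).map
              (fun v => k ++ "=" ++ v)) [] := by
          exact PySem.List.foldl_congr_mem _ _ _ _ (fun acc k _ => hinner k acc)
      _ = (PySem.List.sorted d.keys (fun k => k)).flatMap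
            (fun k => (PySem.List.sorted (d.getD k []) (fun v => v)).map
              (fun v => k ++ "=" ++ v)) := by
          rw [PySem.List.foldl_append_eq_flatMap]; rfl
      _ = (pvTarget d).map (fun kv => kv.1 ++ "=" ++ kv.2) := by
          unfold pvTarget
          rw [List.map_flatMap]
          simp [List.map_map, Function.comp_def]
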